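-- pv_equiv track=rewrite | github.com/Lkk-Web/openclaw-config | skills/graph-query/script.py | check_skill_trigger
-- ===== SOURCE A (Python) =====
-- def check_skill_trigger(user_input):
--     """检查是否触发图谱查询技能"""
--     triggers = [
--         "query-graph", "/kg", "kg ", "查询图谱",
--         "图谱查询", "search graph", "find entity",
--         "图谱搜索", "搜索图谱"
--     ]
--     user_lower = user_input.lower()
--     return any(t in user_lower for t in triggers)
-- ===== SOURCE B (Python) =====
-- def check_skill_trigger(user_input):
--     """检查是否触发图谱查询技能"""
--     triggers = [
--         "query-graph", "/kg", "kg ", "查询图谱",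
--         "图谱查询", "search graph", "find entity",
--         "图谱搜索", "搜索图谱"
--     ]
--     s = user_input.lower()
--     # single left-to-right scan: at each position test whether some trigger starts there
--     for i in range(len(s)):
--         for t in triggers:
--             if s.startswith(t, i):
--                 return True
--     return False
-- ===== Notes on version B (the rewrite author's own statement) =====
-- stated objective: alternative
-- what changed: Replaced the trigger-major any(t in s) over k independent substring searches by a single position-major left-to-right scan of the lowered string that tests at each position whether some trigger starts there.
import Mathlib
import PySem

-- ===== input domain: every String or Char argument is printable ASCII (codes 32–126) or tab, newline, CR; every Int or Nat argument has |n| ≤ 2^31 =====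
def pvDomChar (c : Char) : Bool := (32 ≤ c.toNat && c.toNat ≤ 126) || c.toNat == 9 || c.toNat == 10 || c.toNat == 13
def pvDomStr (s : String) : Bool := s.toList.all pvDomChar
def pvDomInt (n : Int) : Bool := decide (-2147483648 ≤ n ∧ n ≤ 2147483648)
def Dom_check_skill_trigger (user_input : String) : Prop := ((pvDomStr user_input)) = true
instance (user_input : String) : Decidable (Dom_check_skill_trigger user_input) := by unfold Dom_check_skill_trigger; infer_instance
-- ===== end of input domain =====

-- ===== PORT A =====
-- B changes the traversal: one position-major scan instead of k substring searches (same cost class).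
def pvTriggers : List String :=
  ["query-graph", "/kg", "kg ", "查询图谱",
   "图谱查询", "search graph", "find entity",
   "图谱搜索", "搜索图谱"]

def check_skill_trigger (user_input : String) : Bool :=
  let user_lower := PySem.Str.lower user_input
  pvTriggers.any (fun t => PySem.Str.isIn t user_lower)

-- ===== PORT B =====
-- scan over the suffixes of s (i = position): any trigger starting at this position?
def pvScan (ts : List String) : List Char → Bool
  | [] => false
  | c :: rest =>
    (ts.any (fun t => PySem.Chars.startswith (c :: rest) t.toList)) || pvScan ts rest

def check_skill_trigger_alt (user_input : String) : Bool :=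
  pvScan pvTriggers (PySem.Str.lower user_input).toList

-- ===== PRECONDITION & SPEC =====
def Spec_check_skill_trigger (user_input : String) (out : Bool) : Prop := out = check_skill_trigger_alt user_input
instance (user_input : String) (out : Bool) : Decidable (Spec_check_skill_trigger user_input out) := by unfold Spec_check_skill_trigger; infer_instance

-- ===== CLAIM (what is proved, stated in full; the proofs are below) =====
def Claim_equal_check_skill_trigger : Prop := ∀ (user_input : String), Dom_check_skill_trigger user_input → Spec_check_skill_trigger user_input (check_skill_trigger user_input)

-- ===== LEMMAS AND PROOFS =====
-- every trigger is a nonempty string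
lemma pvTriggers_ne_nil : ∀ t ∈ pvTriggers, t.toList ≠ [] := by decide

lemma pv_any_or (l : List String) (f g : String → Bool) :
    (l.any fun t => f t || g t) = (l.any f || l.any g) := by
  induction l with
  | nil => simp
  | cons a t ih => cases hf : f a <;> cases hg : g a <;> simp [List.any_cons, hf, hg, ih]

lemma pv_startswith_or_isIn (t : String) (c : Char) (rest : List Char) :
    (PySem.Chars.startswith (c :: rest) t.toList || PySem.Chars.isIn t.toList rest)
      = PySem.Chars.isIn t.toList (c :: rest) := by
  by_cases hp : t.toList <+: c :: rest
  · simp [PySem.Chars.startswith, List.isPrefixOf_iff_prefix.mpr hp,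
      (PySem.Chars.isIn_iff_infix _ _).mpr hp.isInfix]
  · by_cases hi : t.toList <:+: rest
    · simp [(PySem.Chars.isIn_iff_infix _ _).mpr hi,
        (PySem.Chars.isIn_iff_infix _ _).mpr (hi.trans (List.suffix_cons c rest).isInfix)]
    · have hni : ¬ t.toList <:+: c :: rest := by
        rw [List.infix_cons_iff]; rintro (h1 | h2) <;> [exact hp h1; exact hi h2]
      have hps : t.toList.isPrefixOf (c :: rest) = false := by
        rw [Bool.eq_false_iff]; intro hb; exact hp (List.isPrefixOf_iff_prefix.mp hb)
      simp [PySem.Chars.startswith, (PySem.Chars.isIn_eq_false_iff _ _).mpr hni,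
        (PySem.Chars.isIn_eq_false_iff _ _).mpr hi, hps]

lemma pvScan_eq_any_isIn (ts : List String) (h : ∀ t ∈ ts, t.toList ≠ []) :
    ∀ l : List Char, pvScan ts l = ts.any (fun t => PySem.Chars.isIn t.toList l) := by
  intro l
  induction l with
  | nil =>
    simp only [pvScan]
    symm
    simp only [List.any_eq_false, Bool.not_eq_true]
    intro t ht
    rw [PySem.Chars.isIn_eq_false_iff]
    intro hinf
    exact h t ht (List.eq_nil_of_infix_nil hinf)
  | cons c rest ih =>
    simp only [pvScan, ih, ← pv_any_or]
    exact List.any_congr rfl (fun t => pv_startswith_or_isIn t c rest)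

-- ===== VERDICT (by name: the statement is the Claim_ definition above) =====
theorem check_skill_trigger_spec : Claim_equal_check_skill_trigger := by
  intro s _
  unfold Spec_check_skill_trigger check_skill_trigger check_skill_trigger_alt
  rw [pvScan_eq_any_isIn pvTriggers pvTriggers_ne_nil]
  exact List.any_congr rfl (fun t => by rw [PySem.Str.isIn_eq, PySem.Str.toList_lower])
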